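-- pv_equiv track=rewrite | github.com/fernandouval/gobtrans-api | scraping/scraping/spiders/parsers/assistance.py | parse_nlp_list
-- ===== SOURCE A (Python) =====
-- def parse_nlp_list(paragraph):
--     asistees = paragraph.split(',')
--
--     # first_name last_name
--     # first_name last_name y last_name2
--
--     # first_name last_name y first_name' last_name'
--     # first_name last_name y first_name' last_name' y last_name2'
--
--     # first_name last_name y last_name2 y first_name' last_name'
--     # first_name last_name y last_name2 y first_name' last_name' y last_name2'
--
--     last = asistees.pop()
--     last_chunks = [chunk.split() for chunk in last.split(' y ')]
--     while last_chunks: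
--         last_pair = last_chunks[-2:]
--         del last_chunks[-2:]
--
--         if len(last_pair) == 1:
--             asistees.append(' '.join(last_pair[0]))
--         elif len(last_pair[1]) == 1:
--             asistees.append(' y '.join(' '.join(chunk) for chunk in last_pair))
--         else:
--             asistees.append(' '.join(last_pair[1]))
--             last_chunks.append(last_pair[0])
--
--     return asistees
-- ===== SOURCE B (Python) =====
-- def _emit(rev):
--     # rev = the ' y '-chunks in reverse order; emit names right-to-left,
--     # pairing a single-word chunk with its left neighbour.
--     if not rev:
--         return []
--     if len(rev) == 1:
--         return [' '.join(rev[0])]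
--     head = rev[0]
--     if len(head) == 1:
--         return [' y '.join([' '.join(rev[1]), ' '.join(head)])] + _emit(rev[2:])
--     return [' '.join(head)] + _emit(rev[1:])
--
--
-- def parse_nlp_list(paragraph):
--     asistees = paragraph.split(',')
--     *init, last = asistees
--     chunks = [c.split() for c in last.split(' y ')]
--     return init + _emit(chunks[::-1])
-- ===== Notes on version B (the rewrite author's own statement) =====
-- stated objective: simpler
-- what changed: Replaces A's stack-mutating while-loop (slice the last two chunks off, re-join, sometimes push one back) with a pure structural recursion over the reversed chunk list that pairs a single-word chunk with its left neighbour.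
import Mathlib
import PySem

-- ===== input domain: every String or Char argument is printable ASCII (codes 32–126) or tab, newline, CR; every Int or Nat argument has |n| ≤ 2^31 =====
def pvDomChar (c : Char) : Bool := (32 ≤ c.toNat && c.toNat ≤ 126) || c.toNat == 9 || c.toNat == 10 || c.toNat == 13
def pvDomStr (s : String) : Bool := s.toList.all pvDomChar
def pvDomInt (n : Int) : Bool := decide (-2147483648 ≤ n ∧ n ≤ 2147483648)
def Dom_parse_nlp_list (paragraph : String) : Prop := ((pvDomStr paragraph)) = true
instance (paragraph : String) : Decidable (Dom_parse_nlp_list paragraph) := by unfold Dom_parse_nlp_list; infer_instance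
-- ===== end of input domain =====

-- B replaces A's stack-mutating while-loop (slice off the last two chunks, sometimes push one
-- back) with pure structural recursion over the reversed chunk list; same return value.

-- ===== PORT A =====
-- the while-loop: last_pair = last_chunks[-2:]; del last_chunks[-2:]; then the three branches
def parse_nlp_list_loop (chunks : List (List String)) (acc : List String) : List String :=
  if h : chunks = [] then acc
  else
    let pair := chunks.drop (chunks.length - 2)   -- last_chunks[-2:]
    let rest := chunks.take (chunks.length - 2)   -- del last_chunks[-2:]
    if pair.length = 1 then
      parse_nlp_list_loop rest (acc ++ [PySem.Str.join " " (pair.getD 0 [])])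
    else if (pair.getD 1 []).length = 1 then
      parse_nlp_list_loop rest (acc ++ [PySem.Str.join " y " (pair.map (PySem.Str.join " "))])
    else
      parse_nlp_list_loop (rest ++ [pair.getD 0 []]) (acc ++ [PySem.Str.join " " (pair.getD 1 [])])
termination_by chunks.length
decreasing_by
  · have := List.length_pos_iff.mpr h; simp [List.length_take]; omega
  · have := List.length_pos_iff.mpr h; simp [List.length_take]; omega
  · have hp : pair.length = chunks.length - (chunks.length - 2) := List.length_drop ..
    have := List.length_pos_iff.mpr h
    simp [List.length_take]; omega

def parse_nlp_list (paragraph : String) : List String :=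
  let asistees := (PySem.Str.split? paragraph ",").getD []   -- sep ≠ "": split? is some
  match PySem.List.pop? asistees (-1) with
  | none => []   -- unreachable: split(',') always returns a nonempty list
  | some (last, rest) =>
      let last_chunks := ((PySem.Str.split? last " y ").getD []).map PySem.Str.split₀
      parse_nlp_list_loop last_chunks rest

-- ===== PORT B =====
-- _emit: structural recursion over the reversed chunk list
def parse_nlp_list_emit : List (List String) → List String
  | [] => []
  | [c] => [PySem.Str.join " " c]
  | head :: nxt :: rest =>
      if head.length = 1 then
        PySem.Str.join " y " [PySem.Str.join " " nxt, PySem.Str.join " " head]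
          :: parse_nlp_list_emit rest
      else
        PySem.Str.join " " head :: parse_nlp_list_emit (nxt :: rest)

def parse_nlp_list_alt (paragraph : String) : List String :=
  let asistees := (PySem.Str.split? paragraph ",").getD []   -- sep ≠ "": split? is some
  if asistees = [] then []   -- unreachable: split(',') is nonempty ('*init, last' would raise)
  else
    let init := asistees.dropLast
    let last := asistees.getLastD ""
    let chunks := ((PySem.Str.split? last " y ").getD []).map PySem.Str.split₀
    init ++ parse_nlp_list_emit chunks.reverse

-- ===== PRECONDITION & SPEC =====
def Spec_parse_nlp_list (paragraph : String) (out : List String) : Prop := out = parse_nlp_list_alt paragraph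
instance (paragraph : String) (out : List String) : Decidable (Spec_parse_nlp_list paragraph out) := by unfold Spec_parse_nlp_list; infer_instance

-- ===== CLAIM (what is proved, stated in full; the proofs are below) =====
def Claim_equal_parse_nlp_list : Prop := ∀ (paragraph : String), Dom_parse_nlp_list paragraph → Spec_parse_nlp_list paragraph (parse_nlp_list paragraph)

-- ===== LEMMAS AND PROOFS =====

-- A's stack loop emits exactly B's right-to-left recursion over the reversed list.
theorem parse_nlp_list_loop_eq :
    ∀ (n : ℕ) (chunks : List (List String)) (acc : List String), chunks.length = n →
      parse_nlp_list_loop chunks acc = acc ++ parse_nlp_list_emit chunks.reverse := by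
  intro n
  induction n using Nat.strong_induction_on with
  | _ n ih =>
    intro chunks acc hlen
    rcases chunks.eq_nil_or_concat with rfl | ⟨ys, c2, rfl⟩
    · rw [parse_nlp_list_loop]; simp [parse_nlp_list_emit]
    · rcases ys.eq_nil_or_concat with rfl | ⟨zs, c1, rfl⟩
      · -- chunks = [c2]
        rw [parse_nlp_list_loop]
        rw [dif_neg (by simp)]
        rw [if_pos (by simp)]
        rw [parse_nlp_list_loop]
        simp [parse_nlp_list_emit]
      · -- chunks = zs ++ [c1, c2]
        simp only [List.concat_eq_append] at hlen ⊢
        have hch : zs ++ [c1] ++ [c2] = zs ++ [c1, c2] := by simp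
        rw [hch] at hlen ⊢
        have hlen2 : (zs ++ [c1, c2]).length = zs.length + 2 := by simp
        rw [parse_nlp_list_loop]
        rw [dif_neg (by simp)]
        have hdrop : (zs ++ [c1, c2]).drop ((zs ++ [c1, c2]).length - 2) = [c1, c2] := by
          rw [hlen2]; simpa using List.drop_left' (l₁ := zs) (l₂ := [c1, c2]) rfl
        have htake : (zs ++ [c1, c2]).take ((zs ++ [c1, c2]).length - 2) = zs := by
          rw [hlen2]; simpa using List.take_left' (l₁ := zs) (l₂ := [c1, c2]) rfl
        simp only [hdrop, htake]
        rw [if_neg (by simp)]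
        by_cases hc2 : c2.length = 1
        · rw [if_pos (by simp [hc2])]
          rw [ih zs.length (by omega) zs _ rfl]
          simp [parse_nlp_list_emit, hc2]
        · rw [if_neg (by simp [hc2])]
          simp only [List.getD_cons_zero, List.getD_cons_succ]
          rw [ih (zs.length + 1) (by omega) (zs ++ [c1]) _ (by simp)]
          simp [parse_nlp_list_emit, hc2]

-- ===== VERDICT (by name: the statement is the Claim_ definition above) =====
theorem parse_nlp_list_spec : Claim_equal_parse_nlp_list := by
  intro paragraph _
  unfold Spec_parse_nlp_list parse_nlp_list parse_nlp_list_alt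
  rcases ((PySem.Str.split? paragraph ",").getD []).eq_nil_or_concat with h | ⟨ys, x, h⟩
  · rw [h]
    simp [PySem.List.pop?]
  · rw [h]
    simp only [List.concat_eq_append]
    rw [PySem.List.pop?_last, if_neg (by simp)]
    simp only [List.dropLast_concat, List.getLastD_concat]
    exact parse_nlp_list_loop_eq _ _ _ rfl
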